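-- pv_equiv track=rewrite | github.com/flyark/in_silico_ppi_analysis | flypredictome_agent.py | _res_spec
-- ===== SOURCE A (Python) =====
-- def _res_spec(positions: set, chain: str) -> str:
--     """Build ChimeraX residue specifier: /A:384-486,490-500"""
--     if not positions:
--         return ""
--     sorted_pos = sorted(positions)
--     ranges = []
--     start = end = sorted_pos[0]
--     for p in sorted_pos[1:]:
--         if p == end + 1:
--             end = p
--         else:
--             ranges.append(f"{start}-{end}" if start != end else str(start))
--             start = end = p
--     ranges.append(f"{start}-{end}" if start != end else str(start))
--     return f"/{chain}:" + ",".join(ranges)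
-- ===== SOURCE B (Python) =====
-- def _res_spec(positions: set, chain: str) -> str:
--     """Build ChimeraX residue specifier: /A:384-486,490-500"""
--     sp = sorted(positions)
--     if not sp:
--         return ""
--     n = len(sp)
--     # staged passes: first compute the cut indices where a new run begins,
--     # then format each segment from its boundary indices alone
--     cuts = [0] + [i for i in range(1, n) if sp[i] != sp[i - 1] + 1] + [n]
--     parts = [
--         f"{sp[a]}-{sp[b - 1]}" if sp[a] != sp[b - 1] else str(sp[a])
--         for a, b in zip(cuts, cuts[1:])
--     ]
--     return f"/{chain}:" + ",".join(parts)
-- ===== Notes on version B (the rewrite author's own statement) =====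
-- stated objective: alternative
-- what changed: Replaces A's single accumulator loop carrying (ranges, start, end) running state by staged passes: one comprehension computes the cut indices where a new run starts, then each segment is formatted directly from its boundary indices via zip(cuts, cuts[1:]).
import Mathlib
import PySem

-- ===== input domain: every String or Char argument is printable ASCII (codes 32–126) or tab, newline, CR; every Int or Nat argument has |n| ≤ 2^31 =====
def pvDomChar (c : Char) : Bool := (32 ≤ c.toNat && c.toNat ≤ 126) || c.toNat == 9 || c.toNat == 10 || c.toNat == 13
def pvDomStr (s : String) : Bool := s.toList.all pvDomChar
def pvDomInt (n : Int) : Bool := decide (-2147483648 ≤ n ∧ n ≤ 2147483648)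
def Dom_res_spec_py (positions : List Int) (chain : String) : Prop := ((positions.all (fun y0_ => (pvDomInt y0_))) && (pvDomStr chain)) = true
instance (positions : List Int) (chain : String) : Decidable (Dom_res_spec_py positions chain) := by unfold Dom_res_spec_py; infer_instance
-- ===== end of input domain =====

-- B replaces A's accumulator loop carrying (ranges, start, end) by staged passes: compute the
-- cut indices where a new run starts, then format each segment from its boundary indices
-- (objective: alternative, same cost).

-- ===== PORT A =====
-- literal port of A: sort, then one foldl over the tail carrying (ranges, start, end)
def res_spec_py (positions : List Int) (chain : String) : String :=
  if positions.isEmpty then "" else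
  match PySem.List.sorted positions (fun x => x) false with
  | [] => ""   -- unreachable: sorted of a nonempty list is nonempty
  | s0 :: tl =>
    let r := tl.foldl (fun (acc : List String × Int × Int) p =>
      if p = acc.2.2 + 1 then (acc.1, acc.2.1, p)
      else (acc.1 ++ [if acc.2.1 ≠ acc.2.2
                      then PySem.Int.toStr acc.2.1 ++ "-" ++ PySem.Int.toStr acc.2.2
                      else PySem.Int.toStr acc.2.1], p, p)) ([], s0, s0)
    "/" ++ chain ++ ":" ++
      PySem.Str.join "," (r.1 ++ [if r.2.1 ≠ r.2.2
                                  then PySem.Int.toStr r.2.1 ++ "-" ++ PySem.Int.toStr r.2.2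
                                  else PySem.Int.toStr r.2.1])

-- ===== PORT B =====
-- port of Source B: sort; cut indices [0] + [i in range(1,n) with sp[i] != sp[i-1]+1] + [n];
-- format each segment from consecutive cut pairs. All indices used are in range, so
-- sp[i] is ported as pyGetD with default 0 (never reached).
def res_spec_py_alt (positions : List Int) (chain : String) : String :=
  let sp := PySem.List.sorted positions (fun x => x) false
  if sp.isEmpty then "" else
  let n : Int := sp.length
  let cuts : List Int :=
    0 :: (((PySem.List.pyRange 1 n 1).filter
            (fun i => PySem.List.pyGetD sp i 0 ≠ PySem.List.pyGetD sp (i - 1) 0 + 1)) ++ [n])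
  let parts := (cuts.zip (PySem.List.slice cuts (some 1) none)).map (fun ab =>
    if PySem.List.pyGetD sp ab.1 0 ≠ PySem.List.pyGetD sp (ab.2 - 1) 0
    then PySem.Int.toStr (PySem.List.pyGetD sp ab.1 0) ++ "-" ++
         PySem.Int.toStr (PySem.List.pyGetD sp (ab.2 - 1) 0)
    else PySem.Int.toStr (PySem.List.pyGetD sp ab.1 0))
  "/" ++ chain ++ ":" ++ PySem.Str.join "," parts

-- ===== PRECONDITION & SPEC =====
def Spec_res_spec_py (positions : List Int) (chain : String) (out : String) : Prop := out = res_spec_py_alt positions chain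
instance (positions : List Int) (chain : String) (out : String) : Decidable (Spec_res_spec_py positions chain out) := by unfold Spec_res_spec_py; infer_instance

-- ===== CLAIM (what is proved, stated in full; the proofs are below) =====
def Claim_equal_res_spec_py : Prop := ∀ (positions : List Int) (chain : String), Dom_res_spec_py positions chain → Spec_res_spec_py positions chain (res_spec_py positions chain)

-- ===== LEMMAS AND PROOFS =====

-- canonical form shared by both proofs: the list of range strings, given current run's (start, end)
def pvFmt (s e : Int) : String :=
  if s ≠ e then PySem.Int.toStr s ++ "-" ++ PySem.Int.toStr e else PySem.Int.toStr s

def pvCRuns : Int → Int → List Int → List String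
  | s, e, [] => [pvFmt s e]
  | s, e, p :: t => if p = e + 1 then pvCRuns s p t else pvFmt s e :: pvCRuns p p t

-- A's fold, finalized with the trailing append, produces acc ++ the canonical runs
theorem foldA_eq (t : List Int) : ∀ (acc : List String) (s e : Int),
    (t.foldl (fun (acc : List String × Int × Int) p =>
      if p = acc.2.2 + 1 then (acc.1, acc.2.1, p)
      else (acc.1 ++ [if acc.2.1 ≠ acc.2.2
                      then PySem.Int.toStr acc.2.1 ++ "-" ++ PySem.Int.toStr acc.2.2
                      else PySem.Int.toStr acc.2.1], p, p)) (acc, s, e)).1 ++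
    [if (t.foldl (fun (acc : List String × Int × Int) p =>
      if p = acc.2.2 + 1 then (acc.1, acc.2.1, p)
      else (acc.1 ++ [if acc.2.1 ≠ acc.2.2
                      then PySem.Int.toStr acc.2.1 ++ "-" ++ PySem.Int.toStr acc.2.2
                      else PySem.Int.toStr acc.2.1], p, p)) (acc, s, e)).2.1 ≠
        (t.foldl (fun (acc : List String × Int × Int) p =>
      if p = acc.2.2 + 1 then (acc.1, acc.2.1, p)
      else (acc.1 ++ [if acc.2.1 ≠ acc.2.2
                      then PySem.Int.toStr acc.2.1 ++ "-" ++ PySem.Int.toStr acc.2.2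
                      else PySem.Int.toStr acc.2.1], p, p)) (acc, s, e)).2.2
     then PySem.Int.toStr (t.foldl (fun (acc : List String × Int × Int) p =>
      if p = acc.2.2 + 1 then (acc.1, acc.2.1, p)
      else (acc.1 ++ [if acc.2.1 ≠ acc.2.2
                      then PySem.Int.toStr acc.2.1 ++ "-" ++ PySem.Int.toStr acc.2.2
                      else PySem.Int.toStr acc.2.1], p, p)) (acc, s, e)).2.1 ++ "-" ++
          PySem.Int.toStr (t.foldl (fun (acc : List String × Int × Int) p =>
      if p = acc.2.2 + 1 then (acc.1, acc.2.1, p)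
      else (acc.1 ++ [if acc.2.1 ≠ acc.2.2
                      then PySem.Int.toStr acc.2.1 ++ "-" ++ PySem.Int.toStr acc.2.2
                      else PySem.Int.toStr acc.2.1], p, p)) (acc, s, e)).2.2
     else PySem.Int.toStr (t.foldl (fun (acc : List String × Int × Int) p =>
      if p = acc.2.2 + 1 then (acc.1, acc.2.1, p)
      else (acc.1 ++ [if acc.2.1 ≠ acc.2.2
                      then PySem.Int.toStr acc.2.1 ++ "-" ++ PySem.Int.toStr acc.2.2
                      else PySem.Int.toStr acc.2.1], p, p)) (acc, s, e)).2.1]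
    = acc ++ pvCRuns s e t := by
  induction t with
  | nil => intro acc s e; simp [pvCRuns, pvFmt]
  | cons p t ih =>
    intro acc s e
    simp only [List.foldl_cons, pvCRuns]
    by_cases h : p = e + 1
    · rw [if_pos h, if_pos h]
      exact ih acc s p
    · rw [if_neg h, if_neg h, ih]
      simp [pvFmt, List.append_assoc]

-- B's segment formatter applied to the zip of cuts with its tail
def pvParts (sp : List Int) (cuts : List Int) : List String :=
  (cuts.zip cuts.tail).map (fun ab =>
    if PySem.List.pyGetD sp ab.1 0 ≠ PySem.List.pyGetD sp (ab.2 - 1) 0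
    then PySem.Int.toStr (PySem.List.pyGetD sp ab.1 0) ++ "-" ++
         PySem.Int.toStr (PySem.List.pyGetD sp (ab.2 - 1) 0)
    else PySem.Int.toStr (PySem.List.pyGetD sp ab.1 0))

theorem pvParts_cons (sp : List Int) (x y : Int) (r : List Int) :
    pvParts sp (x :: y :: r) =
      (if PySem.List.pyGetD sp x 0 ≠ PySem.List.pyGetD sp (y - 1) 0
       then PySem.Int.toStr (PySem.List.pyGetD sp x 0) ++ "-" ++
            PySem.Int.toStr (PySem.List.pyGetD sp (y - 1) 0)
       else PySem.Int.toStr (PySem.List.pyGetD sp x 0)) :: pvParts sp (y :: r) := by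
  simp [pvParts]

-- main invariant of B's staged computation: from any in-range offset j with current run
-- start index a < j, the formatted segments equal the canonical runs of the suffix
theorem partsB_eq (sp : List Int) : ∀ (k a j : Nat), a < j → j ≤ sp.length →
    sp.length - j = k →
    pvParts sp ((a : Int) :: (((PySem.List.pyRange j sp.length 1).filter
        (fun i => PySem.List.pyGetD sp i 0 ≠ PySem.List.pyGetD sp (i - 1) 0 + 1)) ++
        [(sp.length : Int)]))
      = pvCRuns (sp.getD a 0) (sp.getD (j - 1) 0) (sp.drop j) := by
  intro k
  induction k with
  | zero =>
    intro a j ha hj hk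
    have hjn : j = sp.length := by omega
    subst hjn
    rw [PySem.List.pyRange_one_eq_nil (by omega)]
    simp only [List.filter_nil, List.nil_append, List.drop_length, pvCRuns]
    have h1 : PySem.List.pyGetD sp ((a : Nat) : Int) 0 = sp.getD a 0 :=
      PySem.List.pyGetD_natCast sp a 0
    have h2 : ((sp.length : Int) - 1) = ((sp.length - 1 : Nat) : Int) := by omega
    simp [pvParts, pvFmt, h1, h2, PySem.List.pyGetD_natCast]
  | succ k ih =>
    intro a j ha hj hk
    have hjlt : j < sp.length := by omega
    have hdrop : sp.drop j = sp[j] :: sp.drop (j + 1) := List.drop_eq_getElem_cons hjlt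
    rw [PySem.List.pyRange_one_cons (by exact_mod_cast hjlt)]
    have hgj : PySem.List.pyGetD sp ((j : Nat) : Int) 0 = sp.getD j 0 :=
      PySem.List.pyGetD_natCast sp j 0
    have hgj1 : PySem.List.pyGetD sp (((j : Nat) : Int) - 1) 0 = sp.getD (j - 1) 0 := by
      have : ((j : Nat) : Int) - 1 = ((j - 1 : Nat) : Int) := by omega
      rw [this]; exact PySem.List.pyGetD_natCast sp (j - 1) 0
    have hgetj : sp.getD j 0 = sp[j] := List.getD_eq_getElem sp 0 hjlt
    rw [hdrop]
    have hq : (sp[j]?.getD 0 = sp[j - 1]?.getD 0 + 1) ↔ (sp[j] = sp.getD (j - 1) 0 + 1) := by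
      simp [List.getD, List.getElem?_eq_getElem hjlt]
    by_cases hrun : sp[j] = sp.getD (j - 1) 0 + 1
    · -- no new cut at j: same segment continues
      rw [List.filter_cons_of_neg (by simp [hgj, hgj1]; exact hq.mpr hrun)]
      have := ih a (j + 1) (by omega) (by omega) (by omega)
      rw [show (j + 1 : Nat) - 1 = j by omega] at this
      rw [show (((j : Nat) + 1 : Nat) : Int) = ((j : Nat) : Int) + 1 by push_cast; ring] at this
      rw [this]
      simp only [pvCRuns, if_pos hrun, hgetj]
    · -- a new run starts at j
      rw [List.filter_cons_of_pos (by simp [hgj, hgj1]; exact fun h => hrun (hq.mp h))]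
      rw [List.cons_append, pvParts_cons]
      have hfmt : (if PySem.List.pyGetD sp ((a : Nat) : Int) 0 ≠
              PySem.List.pyGetD sp (((j : Nat) : Int) - 1) 0
          then PySem.Int.toStr (PySem.List.pyGetD sp ((a : Nat) : Int) 0) ++ "-" ++
               PySem.Int.toStr (PySem.List.pyGetD sp (((j : Nat) : Int) - 1) 0)
          else PySem.Int.toStr (PySem.List.pyGetD sp ((a : Nat) : Int) 0))
          = pvFmt (sp.getD a 0) (sp.getD (j - 1) 0) := by
        rw [hgj1, PySem.List.pyGetD_natCast]; rfl
      rw [hfmt]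
      have := ih j (j + 1) (by omega) (by omega) (by omega)
      rw [show (j + 1 : Nat) - 1 = j by omega] at this
      rw [show (((j : Nat) + 1 : Nat) : Int) = ((j : Nat) : Int) + 1 by push_cast; ring] at this
      rw [this]
      simp only [pvCRuns, if_neg hrun, hgetj]

-- top-level corollary of partsB_eq for the whole sorted list
theorem partsB_top (s0 : Int) (tl : List Int) :
    pvParts (s0 :: tl) ((0 : Int) :: (((PySem.List.pyRange 1 (((s0 :: tl).length : Nat) : Int) 1).filter
        (fun i => PySem.List.pyGetD (s0 :: tl) i 0 ≠ PySem.List.pyGetD (s0 :: tl) (i - 1) 0 + 1)) ++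
        [(((s0 :: tl).length : Nat) : Int)]))
      = pvCRuns s0 s0 tl := by
  have h := partsB_eq (s0 :: tl) tl.length 0 1 (by omega) (by simp) (by simp)
  simpa using h

-- ===== VERDICT (by name: the statement is the Claim_ definition above) =====
theorem res_spec_py_spec : Claim_equal_res_spec_py := by
  intro positions chain _
  unfold Spec_res_spec_py res_spec_py res_spec_py_alt
  by_cases hp : positions.isEmpty
  · have : PySem.List.sorted positions (fun x => x) false = [] := by
      rw [PySem.List.sorted_eq_nil_iff]
      simpa [List.isEmpty_iff] using hp
    simp [hp, this]
  · have hs : PySem.List.sorted positions (fun x => x) false ≠ [] := by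
      rw [Ne, PySem.List.sorted_eq_nil_iff]
      intro h; rw [h] at hp; simp at hp
    cases hsor : PySem.List.sorted positions (fun x => x) false with
    | nil => exact absurd hsor hs
    | cons s0 tl =>
      simp only [hp, List.isEmpty_cons, if_neg, Bool.false_eq_true, not_false_eq_true]
      have hA := foldA_eq tl [] s0 s0
      rw [List.nil_append] at hA
      rw [PySem.List.slice_from_one]
      refine congrArg (fun l => "/" ++ chain ++ ":" ++ PySem.Str.join "," l) ?_
      rw [hA]
      exact (partsB_top s0 tl).symm
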